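-- pv_equiv track=rewrite | github.com/broadinstitute/data-registry-api | scripts/clara_download.py | filter_datasets
-- ===== SOURCE A (Python) =====
-- def filter_datasets(datasets, uploaded_by=None, status=None, phenotype=None, dataset_name=None):
--     """Filter datasets based on specified criteria"""
--     filtered = []
--
--     for dataset in datasets:
--         match = True
--
--         if uploaded_by and dataset.get("uploaded_by") != uploaded_by:
--             match = False
--         if status and dataset.get("status") != status:
--             match = False
--         if phenotype and dataset.get("phenotype") != phenotype:
--             match = False
--         if dataset_name and dataset_name not in dataset.get("dataset_name", ""):
--             match = False
--
--         if match:
--             filtered.append(dataset)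
--
--     return filtered
-- ===== SOURCE B (Python) =====
-- def filter_datasets(datasets, uploaded_by=None, status=None, phenotype=None, dataset_name=None):
--     """Filter datasets based on specified criteria"""
--     # Build a hash index: bucket datasets by the tuple of their values on the
--     # active equality criteria, then answer with a single bucket lookup and a
--     # substring pass for dataset_name.
--     keys = [k for k, v in (("uploaded_by", uploaded_by),
--                            ("status", status),
--                            ("phenotype", phenotype)) if v]
--     target = tuple(v for v in (uploaded_by, status, phenotype) if v)
--     buckets = {}
--     for d in datasets:
--         buckets.setdefault(tuple(d.get(k) for k in keys), []).append(d)
--     candidates = buckets.get(target, [])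
--     if dataset_name:
--         return [d for d in candidates if dataset_name in d.get("dataset_name", "")]
--     return list(candidates)
-- ===== Notes on version B (the rewrite author's own statement) =====
-- stated objective: alternative
-- what changed: Replaces A's single loop with four in-loop branches by a hash index: datasets are grouped once into dict buckets keyed by the tuple of their values on the active equality criteria, the answer is a single bucket lookup, and only the dataset_name substring test remains a filtering pass.
import Mathlib
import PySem

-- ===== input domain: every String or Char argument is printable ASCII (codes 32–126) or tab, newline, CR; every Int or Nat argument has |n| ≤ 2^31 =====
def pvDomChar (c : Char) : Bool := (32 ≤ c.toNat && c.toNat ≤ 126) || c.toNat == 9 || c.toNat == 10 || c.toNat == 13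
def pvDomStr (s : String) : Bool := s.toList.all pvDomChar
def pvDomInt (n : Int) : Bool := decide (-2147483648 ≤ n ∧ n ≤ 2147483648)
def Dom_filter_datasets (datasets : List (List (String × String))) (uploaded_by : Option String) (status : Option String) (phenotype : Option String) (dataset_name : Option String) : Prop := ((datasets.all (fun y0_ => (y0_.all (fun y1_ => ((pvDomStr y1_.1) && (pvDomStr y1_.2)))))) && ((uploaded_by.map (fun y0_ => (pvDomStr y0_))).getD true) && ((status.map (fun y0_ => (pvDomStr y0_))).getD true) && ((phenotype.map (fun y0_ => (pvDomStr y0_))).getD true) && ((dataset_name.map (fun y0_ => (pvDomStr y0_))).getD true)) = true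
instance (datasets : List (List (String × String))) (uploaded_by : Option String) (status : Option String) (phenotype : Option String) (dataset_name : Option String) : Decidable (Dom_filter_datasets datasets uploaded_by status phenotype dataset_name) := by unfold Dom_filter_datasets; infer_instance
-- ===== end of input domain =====

-- B replaces A's single four-branch filtering loop by a hash index: datasets are grouped
-- into buckets keyed by the tuple of their values on the active equality criteria, the
-- target bucket is looked up once, and only the dataset_name substring test remains a pass.

-- truthiness of an Optional[str]: none and "" are falsy
def pyTruthyStr (o : Option String) : Bool :=
  match o with
  | none => false
  | some s => !s.toList.isEmpty

-- ===== PORT A =====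
-- the loop body's match flag, computed exactly as A's sequence of ifs
def pvMatchA (dataset : List (String × String)) (uploaded_by status phenotype dataset_name : Option String) : Bool :=
  let m := true
  let m := if pyTruthyStr uploaded_by && !(PySem.Dict.get? (PySem.Dict.mk dataset) "uploaded_by" == uploaded_by) then false else m
  let m := if pyTruthyStr status && !(PySem.Dict.get? (PySem.Dict.mk dataset) "status" == status) then false else m
  let m := if pyTruthyStr phenotype && !(PySem.Dict.get? (PySem.Dict.mk dataset) "phenotype" == phenotype) then false else m
  let m := if pyTruthyStr dataset_name && !(PySem.Str.isIn (dataset_name.getD "") (PySem.Dict.getD (PySem.Dict.mk dataset) "dataset_name" "")) then false else m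
  m

def filter_datasets (datasets : List (List (String × String))) (uploaded_by : Option String) (status : Option String) (phenotype : Option String) (dataset_name : Option String) : List (List (String × String)) :=
  datasets.foldl
    (fun filtered dataset =>
      if pvMatchA dataset uploaded_by status phenotype dataset_name then filtered ++ [dataset]
      else filtered)
    []

-- ===== PORT B =====
-- tuple(d.get(k) for k in keys): the dataset's projection onto the active criterion keys
def pvProj (keys : List String) (d : List (String × String)) : List (Option String) :=
  keys.map (fun k => PySem.Dict.get? (PySem.Dict.mk d) k)

def filter_datasets_alt (datasets : List (List (String × String))) (uploaded_by : Option String) (status : Option String) (phenotype : Option String) (dataset_name : Option String) : List (List (String × String)) :=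
  let keys := (([("uploaded_by", uploaded_by), ("status", status), ("phenotype", phenotype)] : List (String × Option String)).filter (fun p => pyTruthyStr p.2)).map Prod.fst
  let target := [uploaded_by, status, phenotype].filter pyTruthyStr
  -- buckets.setdefault(key, []).append(d)  ==  modify key [] (· ++ [d])
  let buckets := datasets.foldl
    (fun b d => PySem.Dict.modify b (pvProj keys d) [] (fun l => l ++ [d]))
    (PySem.Dict.empty : PySem.Dict (List (Option String)) (List (List (String × String))))
  let candidates := PySem.Dict.getD buckets target []
  if pyTruthyStr dataset_name then
    candidates.filter (fun d => PySem.Str.isIn (dataset_name.getD "") (PySem.Dict.getD (PySem.Dict.mk d) "dataset_name" ""))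
  else candidates

-- ===== PRECONDITION & SPEC =====
def Spec_filter_datasets (datasets : List (List (String × String))) (uploaded_by : Option String) (status : Option String) (phenotype : Option String) (dataset_name : Option String) (out : List (List (String × String))) : Prop := out = filter_datasets_alt datasets uploaded_by status phenotype dataset_name
instance (datasets : List (List (String × String))) (uploaded_by : Option String) (status : Option String) (phenotype : Option String) (dataset_name : Option String) (out : List (List (String × String))) : Decidable (Spec_filter_datasets datasets uploaded_by status phenotype dataset_name out) := by unfold Spec_filter_datasets; infer_instance

-- ===== CLAIM =====
def Claim_equal_filter_datasets : Prop := ∀ (datasets : List (List (String × String))) (uploaded_by : Option String) (status : Option String) (phenotype : Option String) (dataset_name : Option String), Dom_filter_datasets datasets uploaded_by status phenotype dataset_name → Spec_filter_datasets datasets uploaded_by status phenotype dataset_name (filter_datasets datasets uploaded_by status phenotype dataset_name)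

-- ===== LEMMAS AND PROOFS =====

-- the combined per-dataset predicate, A's four conditions conjoined
def pvComb (dataset : List (String × String)) (uploaded_by status phenotype dataset_name : Option String) : Bool :=
  (!pyTruthyStr uploaded_by || PySem.Dict.get? (PySem.Dict.mk dataset) "uploaded_by" == uploaded_by) &&
  (!pyTruthyStr status || PySem.Dict.get? (PySem.Dict.mk dataset) "status" == status) &&
  (!pyTruthyStr phenotype || PySem.Dict.get? (PySem.Dict.mk dataset) "phenotype" == phenotype) &&
  (!pyTruthyStr dataset_name || PySem.Str.isIn (dataset_name.getD "") (PySem.Dict.getD (PySem.Dict.mk dataset) "dataset_name" ""))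

theorem pvMatchA_eq (d : List (String × String)) (u s p n : Option String) :
    pvMatchA d u s p n = pvComb d u s p n := by
  unfold pvMatchA pvComb
  cases pyTruthyStr u <;> cases pyTruthyStr s <;> cases pyTruthyStr p <;> cases pyTruthyStr n <;>
    cases (PySem.Dict.get? (PySem.Dict.mk d) "uploaded_by" == u) <;>
    cases (PySem.Dict.get? (PySem.Dict.mk d) "status" == s) <;>
    cases (PySem.Dict.get? (PySem.Dict.mk d) "phenotype" == p) <;>
    cases (PySem.Str.isIn (n.getD "") (PySem.Dict.getD (PySem.Dict.mk d) "dataset_name" "")) <;> simp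

theorem pvA_eq_filter (ds : List (List (String × String))) (u s p n : Option String) :
    filter_datasets ds u s p n = ds.filter (fun d => pvComb d u s p n) := by
  unfold filter_datasets
  have h := PySem.List.foldl_append_if (fun d => pvMatchA d u s p n) id ds []
  simp only [id_eq, List.map_id, List.nil_append] at h
  rw [h]
  exact List.filter_congr (fun x _ => pvMatchA_eq x u s p n)

-- bucket invariant: the target bucket of the grouping fold is the ordered sublist of
-- datasets whose projection equals the target key
theorem pv_bucket_getD (keys : List String) (t : List (Option String))
    (ds : List (List (String × String)))
    (b : PySem.Dict (List (Option String)) (List (List (String × String)))) :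
    PySem.Dict.getD (ds.foldl (fun b d => PySem.Dict.modify b (pvProj keys d) [] (fun l => l ++ [d])) b) t []
      = PySem.Dict.getD b t [] ++ ds.filter (fun d => decide (pvProj keys d = t)) := by
  induction ds generalizing b with
  | nil => simp
  | cons d ds ih =>
    simp only [List.foldl_cons, List.filter_cons, ih]
    rw [PySem.Dict.getD_modify]
    by_cases h : t = pvProj keys d
    · subst h; simp [List.append_assoc]
    · have h' : ¬ pvProj keys d = t := fun hh => h hh.symm
      simp [h, h']

-- per-dataset: projection equals target iff the three equality criteria all hold
theorem pvProj_eq_target (d : List (String × String)) (u s p : Option String) :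
    (pvProj ((([("uploaded_by", u), ("status", s), ("phenotype", p)] : List (String × Option String)).filter (fun q => pyTruthyStr q.2)).map Prod.fst) d
      = [u, s, p].filter pyTruthyStr)
    ↔ (((!pyTruthyStr u || PySem.Dict.get? (PySem.Dict.mk d) "uploaded_by" == u) &&
        (!pyTruthyStr s || PySem.Dict.get? (PySem.Dict.mk d) "status" == s) &&
        (!pyTruthyStr p || PySem.Dict.get? (PySem.Dict.mk d) "phenotype" == p)) = true) := by
  cases hu : pyTruthyStr u <;> cases hs : pyTruthyStr s <;> cases hp : pyTruthyStr p <;>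
    simp [pvProj, List.filter, hu, hs, hp, and_assoc]

theorem pvB_eq_filter (ds : List (List (String × String))) (u s p n : Option String) :
    filter_datasets_alt ds u s p n = ds.filter (fun d => pvComb d u s p n) := by
  simp only [filter_datasets_alt, pv_bucket_getD, PySem.Dict.getD_empty, List.nil_append]
  have hsel : ∀ d : List (String × String),
      (decide (pvProj ((([("uploaded_by", u), ("status", s), ("phenotype", p)] : List (String × Option String)).filter (fun q => pyTruthyStr q.2)).map Prod.fst) d
        = [u, s, p].filter pyTruthyStr))
      = (((!pyTruthyStr u || PySem.Dict.get? (PySem.Dict.mk d) "uploaded_by" == u) &&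
          (!pyTruthyStr s || PySem.Dict.get? (PySem.Dict.mk d) "status" == s) &&
          (!pyTruthyStr p || PySem.Dict.get? (PySem.Dict.mk d) "phenotype" == p))) := by
    intro d
    rw [Bool.eq_iff_iff]
    simp [pvProj_eq_target d u s p]
  split_ifs with hn
  · rw [List.filter_congr (fun d _ => hsel d), List.filter_filter]
    apply List.filter_congr
    intro d _
    simp [pvComb, hn, Bool.and_assoc, Bool.and_comm]
  · have hn' : pyTruthyStr n = false := by revert hn; cases pyTruthyStr n <;> simp
    rw [List.filter_congr (fun d _ => hsel d)]
    apply List.filter_congr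
    intro d _
    simp [pvComb, hn', Bool.and_assoc]

-- ===== VERDICT =====
theorem filter_datasets_spec : Claim_equal_filter_datasets := by
  intro ds u s p n _
  unfold Spec_filter_datasets
  rw [pvA_eq_filter, pvB_eq_filter]
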